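-- pv_equiv track=rewrite | github.com/AlexLence/bloc-de-syntenies | bibliotheque_plot.py | bloc_syn
-- ===== SOURCE A (Python) =====
-- def bloc_syn(liste_sp1,liste_sp2):
-- 	dico_c={}#Dictionnaire de bloc "croissant"
-- 	dico_d={}#Dictionnaire de bloc "décroissant"
-- 	for i in range(len(liste_sp1)):
-- 		cle_c=liste_sp1[i]-liste_sp2[i]#Un bloc aligné "croissant" est un bloc pour le quel x-y=cst
-- 		cle_d=liste_sp2[i]+liste_sp1[i]#Un bloc aligné "croissant" est un bloc pour le quel y+x=cst
-- 		if cle_c in dico_c: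
-- 			if not (liste_sp1[i],liste_sp2[i]) in dico_c[cle_c]:#On ne compte pas en double les couples de valeurs
-- 				dico_c[cle_c].append((liste_sp1[i],liste_sp2[i]))
-- 		else:
-- 			dico_c[cle_c]=[(liste_sp1[i],liste_sp2[i])]
-- 		if cle_d in dico_d:
-- 			if not (liste_sp1[i],liste_sp2[i]) in dico_d[cle_d]:#On ne compte pas en double les couples de valeurs
-- 				dico_d[cle_d].append((liste_sp1[i],liste_sp2[i]))
-- 		else:
-- 			dico_d[cle_d]=[(liste_sp1[i],liste_sp2[i])]
-- 	return(dico_c,dico_d)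
-- ===== SOURCE B (Python) =====
-- def bloc_syn(liste_sp1, liste_sp2):
--     # Pass 1: ordered deduplication of the point pairs (indexing, not zip,
--     # so a too-short liste_sp2 still raises IndexError like the original).
--     seen = set()
--     pairs = []
--     for i in range(len(liste_sp1)):
--         p = (liste_sp1[i], liste_sp2[i])
--         if p not in seen:
--             seen.add(p)
--             pairs.append(p)
--     # Pass 2: group the unique pairs by their diagonal keys, no inner scan.
--     dico_c = {}
--     dico_d = {}
--     for x, y in pairs:
--         dico_c.setdefault(x - y, []).append((x, y))
--         dico_d.setdefault(x + y, []).append((x, y))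
--     return (dico_c, dico_d)
-- ===== Notes on version B (the rewrite author's own statement) =====
-- stated objective: faster
-- what changed: Replaces the single loop that scans each diagonal's bucket list for duplicates with two passes: an O(1)-per-element set-based ordered dedup, then a grouping pass via setdefault with no inner membership scan.
import Mathlib
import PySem

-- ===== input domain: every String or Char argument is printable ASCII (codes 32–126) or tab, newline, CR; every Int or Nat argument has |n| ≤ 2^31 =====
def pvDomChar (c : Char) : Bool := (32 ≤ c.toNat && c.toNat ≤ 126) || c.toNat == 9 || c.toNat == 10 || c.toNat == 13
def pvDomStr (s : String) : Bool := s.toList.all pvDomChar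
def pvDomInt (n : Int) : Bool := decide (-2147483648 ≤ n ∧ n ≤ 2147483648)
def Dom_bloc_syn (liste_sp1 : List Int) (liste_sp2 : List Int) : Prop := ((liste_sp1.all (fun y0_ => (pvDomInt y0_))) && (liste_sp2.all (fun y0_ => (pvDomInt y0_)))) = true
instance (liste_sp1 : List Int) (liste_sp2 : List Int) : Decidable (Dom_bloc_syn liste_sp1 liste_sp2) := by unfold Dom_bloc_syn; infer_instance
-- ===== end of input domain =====

-- B replaces A's per-element scan of the bucket lists by a set-based ordered dedup pass
-- followed by a scan-free grouping pass (objective: faster, constant-factor / bucket-scan removal).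

-- ===== PORT A =====
-- A's loop body for one index i, with x = liste_sp1[i], y = liste_sp2[i].
def pvStepA (st : PySem.Dict Int (List (Int × Int)) × PySem.Dict Int (List (Int × Int)))
    (x y : Int) : PySem.Dict Int (List (Int × Int)) × PySem.Dict Int (List (Int × Int)) :=
  let cle_c := x - y
  let cle_d := y + x
  let dico_c :=
    match st.1.get? cle_c with
    | some l => if (x, y) ∈ l then st.1 else st.1.insert cle_c (l ++ [(x, y)])
    | none => st.1.insert cle_c [(x, y)]
  let dico_d :=
    match st.2.get? cle_d with
    | some l => if (x, y) ∈ l then st.2 else st.2.insert cle_d (l ++ [(x, y)])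
    | none => st.2.insert cle_d [(x, y)]
  (dico_c, dico_d)

def bloc_syn (liste_sp1 : List Int) (liste_sp2 : List Int) : (List (Int × List (Int × Int))) × (List (Int × List (Int × Int))) :=
  let r := (PySem.List.pyRange 0 (PySem.List.len liste_sp1) 1).foldl
    (fun st i => pvStepA st (PySem.List.pyGetD liste_sp1 i 0) (PySem.List.pyGetD liste_sp2 i 0))
    (PySem.Dict.empty, PySem.Dict.empty)
  (r.1.items, r.2.items)

-- ===== PORT B =====
-- B's first pass: seen-set + ordered list of new pairs.
def pvDedupStep (st : PySem.Set (Int × Int) × List (Int × Int)) (p : Int × Int) :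
    PySem.Set (Int × Int) × List (Int × Int) :=
  if PySem.Set.contains st.1 p then st else (PySem.Set.add st.1 p, st.2 ++ [p])

-- B's second pass: dico.setdefault(key, []).append((x, y)) for both keys, no membership check.
def pvGrpStep (st : PySem.Dict Int (List (Int × Int)) × PySem.Dict Int (List (Int × Int)))
    (p : Int × Int) : PySem.Dict Int (List (Int × Int)) × PySem.Dict Int (List (Int × Int)) :=
  (st.1.insert (p.1 - p.2) (st.1.getD (p.1 - p.2) [] ++ [p]),
   st.2.insert (p.1 + p.2) (st.2.getD (p.1 + p.2) [] ++ [p]))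

def bloc_syn_alt (liste_sp1 : List Int) (liste_sp2 : List Int) : (List (Int × List (Int × Int))) × (List (Int × List (Int × Int))) :=
  let pr := (PySem.List.pyRange 0 (PySem.List.len liste_sp1) 1).foldl
    (fun st i => pvDedupStep st (PySem.List.pyGetD liste_sp1 i 0, PySem.List.pyGetD liste_sp2 i 0))
    (PySem.Set.empty, [])
  let g := pr.2.foldl pvGrpStep (PySem.Dict.empty, PySem.Dict.empty)
  (g.1.items, g.2.items)

-- ===== PRECONDITION & SPEC =====
-- Pre_ excludes only the inputs where both Pythons raise IndexError: liste_sp2 shorter than liste_sp1.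
def Pre_bloc_syn (liste_sp1 : List Int) (liste_sp2 : List Int) : Prop :=
  liste_sp1.length ≤ liste_sp2.length
instance (liste_sp1 : List Int) (liste_sp2 : List Int) : Decidable (Pre_bloc_syn liste_sp1 liste_sp2) := by unfold Pre_bloc_syn; infer_instance

def pvWitness_bloc_syn : List Int × List Int := ([1, 2, 1, 5], [3, 4, 3, 1])

def Spec_bloc_syn (liste_sp1 : List Int) (liste_sp2 : List Int) (out : (List (Int × List (Int × Int))) × (List (Int × List (Int × Int)))) : Prop := out = bloc_syn_alt liste_sp1 liste_sp2
instance (liste_sp1 : List Int) (liste_sp2 : List Int) (out : (List (Int × List (Int × Int))) × (List (Int × List (Int × Int)))) : Decidable (Spec_bloc_syn liste_sp1 liste_sp2 out) := by unfold Spec_bloc_syn; infer_instance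

-- ===== CLAIM (what is proved, stated in full; the proofs are below) =====
def Claim_equal_bloc_syn : Prop := ∀ (liste_sp1 : List Int) (liste_sp2 : List Int), Dom_bloc_syn liste_sp1 liste_sp2 → Pre_bloc_syn liste_sp1 liste_sp2 → Spec_bloc_syn liste_sp1 liste_sp2 (bloc_syn liste_sp1 liste_sp2)

-- ===== LEMMAS AND PROOFS =====

-- The pairs of ps not yet in `seen`, first occurrences in order.
def pvNewPairs (seen : List (Int × Int)) : List (Int × Int) → List (Int × Int)
  | [] => []
  | p :: ps => if p ∈ seen then pvNewPairs seen ps else p :: pvNewPairs (seen ++ [p]) ps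

-- B's dedup fold computes pvNewPairs.
lemma pvDedup_fold_eq (ps : List (Int × Int)) :
    ∀ (seen : PySem.Set (Int × Int)) (acc : List (Int × Int)),
    ps.foldl pvDedupStep (seen, acc) = (PySem.Set.update seen ps, acc ++ pvNewPairs seen ps) := by
  induction ps with
  | nil => intro seen acc; simp [pvNewPairs, PySem.Set.update_nil]
  | cons p ps ih =>
    intro seen acc
    by_cases hp : p ∈ seen
    · have hc : PySem.Set.contains seen p = true := (PySem.Set.contains_iff seen p).mpr hp
      simp [pvDedupStep, pvNewPairs, hp, ih, PySem.Set.update_cons]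
    · have hc : PySem.Set.contains seen p = false := by
        rw [Bool.eq_false_iff]; intro h; exact hp ((PySem.Set.contains_iff seen p).mp h)
      simp [pvDedupStep, pvNewPairs, hp, ih, PySem.Set.update_cons]

-- The invariant coupling the seen list with both dictionaries.
def pvInv (seen : List (Int × Int))
    (dc dd : PySem.Dict Int (List (Int × Int))) : Prop :=
  ∀ p : Int × Int, (p ∈ seen ↔ p ∈ dc.getD (p.1 - p.2) []) ∧ (p ∈ seen ↔ p ∈ dd.getD (p.1 + p.2) [])

-- Core: A's fold over pairs equals B's grouping fold over the not-yet-seen pairs.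
lemma pvMain (ps : List (Int × Int)) :
    ∀ (seen : List (Int × Int)) (dc dd : PySem.Dict Int (List (Int × Int))),
    pvInv seen dc dd →
    ps.foldl (fun st p => pvStepA st p.1 p.2) (dc, dd) = (pvNewPairs seen ps).foldl pvGrpStep (dc, dd) := by
  induction ps with
  | nil => intro seen dc dd _; simp [pvNewPairs]
  | cons p ps ih =>
    intro seen dc dd hinv
    obtain ⟨hc, hd⟩ := hinv p
    by_cases hp : p ∈ seen
    · -- pair already present: A's step is the identity
      have hmc : p ∈ dc.getD (p.1 - p.2) [] := hc.mp hp
      have hmd : p ∈ dd.getD (p.1 + p.2) [] := hd.mp hp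
      have hgc : dc.get? (p.1 - p.2) = some (dc.getD (p.1 - p.2) []) := by
        cases hgc : dc.get? (p.1 - p.2) with
        | none => rw [PySem.Dict.getD_of_get?_eq_none _ _ hgc] at hmc; simp at hmc
        | some l => rw [PySem.Dict.getD_of_get?_eq_some _ _ hgc]
      have hgd : dd.get? (p.2 + p.1) = some (dd.getD (p.1 + p.2) []) := by
        rw [show p.2 + p.1 = p.1 + p.2 by ring]
        cases hgd : dd.get? (p.1 + p.2) with
        | none => rw [PySem.Dict.getD_of_get?_eq_none _ _ hgd] at hmd; simp at hmd
        | some l => rw [PySem.Dict.getD_of_get?_eq_some _ _ hgd]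
      have hstep : pvStepA (dc, dd) p.1 p.2 = (dc, dd) := by
        simp [pvStepA, hgc, hgd, hmc, hmd]
      simp only [List.foldl_cons, hstep, pvNewPairs, if_pos hp]
      exact ih seen dc dd hinv
    · -- new pair: A's step is exactly B's grouping step
      have hmc : p ∉ dc.getD (p.1 - p.2) [] := fun h => hp (hc.mpr h)
      have hmd : p ∉ dd.getD (p.1 + p.2) [] := fun h => hp (hd.mpr h)
      have hstep : pvStepA (dc, dd) p.1 p.2 = pvGrpStep (dc, dd) p := by
        simp only [pvStepA, pvGrpStep, Prod.mk.injEq]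
        constructor
        · cases hgc : dc.get? (p.1 - p.2) with
          | none => simp [PySem.Dict.getD_of_get?_eq_none _ _ hgc]
          | some l =>
            rw [PySem.Dict.getD_of_get?_eq_some _ _ hgc] at hmc ⊢
            simp [hmc]
        · rw [show p.2 + p.1 = p.1 + p.2 by ring]
          cases hgd : dd.get? (p.1 + p.2) with
          | none => simp [PySem.Dict.getD_of_get?_eq_none _ _ hgd]
          | some l =>
            rw [PySem.Dict.getD_of_get?_eq_some _ _ hgd] at hmd ⊢
            simp [hmd]
      simp only [List.foldl_cons, hstep, pvNewPairs, if_neg hp]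
      refine ih (seen ++ [p]) _ _ ?_
      intro q
      obtain ⟨hqc, hqd⟩ := hinv q
      rw [PySem.Dict.getD_insert, PySem.Dict.getD_insert]
      constructor
      · by_cases hk : q.1 - q.2 = p.1 - p.2
        · rw [if_pos hk]
          rw [hk] at hqc
          simp [List.mem_append, hqc]
        · rw [if_neg hk]
          have hqp : q ≠ p := by intro h; subst h; exact hk rfl
          simp [List.mem_append, hqp, ← hqc]
      · by_cases hk : q.1 + q.2 = p.1 + p.2
        · rw [if_pos hk]
          rw [hk] at hqd
          simp [List.mem_append, hqd]
        · rw [if_neg hk]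
          have hqp : q ≠ p := by intro h; subst h; exact hk rfl
          simp [List.mem_append, hqp, ← hqd]

-- Indexed fold over range(len l1)) with in-range lookups is the fold over the zip.
lemma pvFoldIdx {σ : Type} (g : σ → Int × Int → σ) :
    ∀ (l1 l2 : List Int), l1.length ≤ l2.length → ∀ (s : σ),
    (List.range l1.length).foldl (fun st k => g st (l1.getD k 0, l2.getD k 0)) s
      = (l1.zip l2).foldl g s := by
  intro l1
  induction l1 with
  | nil => intro l2 _ s; simp
  | cons a as ih =>
    intro l2 hlen s
    cases l2 with
    | nil => simp at hlen
    | cons b bs =>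
      simp only [List.length_cons, List.range_succ_eq_map, List.foldl_cons, List.foldl_map,
        List.zip_cons_cons, List.getD_cons_zero, List.getD_cons_succ]
      exact ih bs (by simpa using hlen) (g s (a, b))

-- The pyRange/pyGetD fold reduces to the plain indexed fold.
lemma pvRangeFold {σ : Type} (g : σ → Int × Int → σ) (l1 l2 : List Int) (s : σ) :
    (PySem.List.pyRange 0 (PySem.List.len l1) 1).foldl
      (fun st i => g st (PySem.List.pyGetD l1 i 0, PySem.List.pyGetD l2 i 0)) s
      = (List.range l1.length).foldl (fun st k => g st (l1.getD k 0, l2.getD k 0)) s := by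
  rw [PySem.List.len_eq, PySem.List.pyRange_zero_natCast, List.foldl_map]
  simp [PySem.List.pyGetD_natCast]

-- ===== VERDICT (by name: the statement is the Claim_ definition above) =====
theorem bloc_syn_spec : Claim_equal_bloc_syn := by
  intro l1 l2 _ hpre
  unfold Spec_bloc_syn bloc_syn bloc_syn_alt
  rw [pvRangeFold (fun st p => pvStepA st p.1 p.2) l1 l2,
      pvRangeFold pvDedupStep l1 l2,
      pvFoldIdx (fun st p => pvStepA st p.1 p.2) l1 l2 hpre,
      pvFoldIdx pvDedupStep l1 l2 hpre,
      pvDedup_fold_eq,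
      pvMain (l1.zip l2) [] PySem.Dict.empty PySem.Dict.empty (by
        intro p; simp [PySem.Dict.getD_empty])]
  simp
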